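-- pv_equiv track=rewrite | github.com/fossgalaxy/hanabi | process_log.py | calc_universes
-- ===== SOURCE A (Python) =====
-- def calc_universes(possible):
--     """no duplicates, choose 1 element from each pool, although i'm not sure if it will work"""
--
--     # if we're the last element, there are n possible combinations
--     if len(possible) == 1:
--         return len(possible[0])
--
--     totals = 0
--     head = possible[0]
--     tail = possible[1:]
--     for item in head:
--         # clone tail so we can remove stuff from it
--         tail_c = []
--         # if we pick an item, it's not available for any other selections
--         for tail_x in tail:
--             tail_x_c = list(tail_x)
--             if item in tail_x_c:
--                 tail_x_c.remove(item)
--             tail_c.append(tail_x_c)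
--         totals += calc_universes(tail_c)
--
--     return totals
-- ===== SOURCE B (Python) =====
-- def calc_universes(possible):
--     """Count selections by grouping each pool's equal values: recurse over pools
--     with a counter of already-used values, weighting each distinct value by its
--     remaining multiplicity instead of cloning and shrinking the tail lists."""
--     def go(pools, used):
--         if not pools:
--             return 1
--         pool = pools[0]
--         rest = pools[1:]
--         total = 0
--         seen = set()
--         for v in pool:
--             if v in seen:
--                 continue
--             seen.add(v)
--             avail = pool.count(v) - used.get(v, 0)
--             if avail > 0:
--                 used2 = dict(used)
--                 used2[v] = used.get(v, 0) + 1
--                 total += avail * go(rest, used2)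
--         return total
--     return go(possible, {})
-- ===== Notes on version B (the rewrite author's own statement) =====
-- stated objective: alternative
-- what changed: Instead of cloning and shrinking every tail pool for each occurrence picked, B recurses over the pools carrying a counter of already-used values and groups each pool's equal values, weighting each distinct value by its remaining multiplicity (count - used), so no lists are ever copied or mutated and duplicate occurrences are handled by one weighted branch instead of one branch per occurrence.
-- crash fix: On possible == [] A raises IndexError (it indexes possible[0]); B returns 1, the empty selection. — e.g. on calc_universes([]): A raises IndexError, B returns 1
import Mathlib
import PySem

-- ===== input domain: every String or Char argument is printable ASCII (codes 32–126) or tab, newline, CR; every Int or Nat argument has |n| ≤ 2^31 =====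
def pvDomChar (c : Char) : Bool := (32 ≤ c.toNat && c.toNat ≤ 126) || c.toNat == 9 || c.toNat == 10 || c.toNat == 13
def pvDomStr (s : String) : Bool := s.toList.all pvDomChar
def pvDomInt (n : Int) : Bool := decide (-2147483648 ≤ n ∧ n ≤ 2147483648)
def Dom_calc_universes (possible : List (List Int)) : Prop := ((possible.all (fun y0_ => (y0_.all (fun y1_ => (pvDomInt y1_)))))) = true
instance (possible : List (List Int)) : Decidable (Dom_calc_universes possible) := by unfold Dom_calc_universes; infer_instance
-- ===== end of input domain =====

-- B groups each pool's equal values and recurses with a used-values counter instead of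
-- cloning/shrinking the tail pools per picked occurrence (alternative algorithm, return value only).

-- ===== PORT A =====
-- Python: tail_x_c = list(tail_x); if item in tail_x_c: tail_x_c.remove(item)
def pyRemoveIfPresent (tx : List Int) (item : Int) : List Int :=
  if item ∈ tx then (PySem.List.remove? tx item).getD tx else tx

mutual
def calc_universes (possible : List (List Int)) : Int :=
  match possible with
  | [] => 0  -- Python raises IndexError here (possible[0]); excluded by Pre_calc_universes
  | head :: tail =>
    if tail.length = 0 then (head.length : Int)
    else loopA head tail 0
  termination_by (possible.length, 0)
  decreasing_by simp [Prod.lex_iff]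
def loopA (items : List Int) (tail : List (List Int)) (totals : Int) : Int :=
  match items with
  | [] => totals
  | item :: rest =>
      loopA rest tail (totals + calc_universes (tail.map (fun tx => pyRemoveIfPresent tx item)))
  termination_by (tail.length, items.length + 1)
  decreasing_by all_goals simp [Prod.lex_iff, List.length_map]
end

-- ===== PORT B =====
mutual
def goB (pools : List (List Int)) (used : PySem.Dict Int Int) : Int :=
  match pools with
  | [] => 1
  | pool :: rest => loopB pool pool rest used PySem.Set.empty 0
  termination_by (pools.length, 0)
  decreasing_by simp [Prod.lex_iff]
def loopB (items : List Int) (pool : List Int) (rest : List (List Int))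
    (used : PySem.Dict Int Int) (seen : PySem.Set Int) (total : Int) : Int :=
  match items with
  | [] => total
  | v :: more =>
    if v ∈ seen then loopB more pool rest used seen total
    else
      let seen' := PySem.Set.add seen v
      let avail : Int := (pool.count v : Int) - used.getD v 0
      if 0 < avail then
        let used2 := used.insert v (used.getD v 0 + 1)
        loopB more pool rest used seen' (total + avail * goB rest used2)
      else loopB more pool rest used seen' total
  termination_by (rest.length, items.length + 1)
  decreasing_by all_goals simp [Prod.lex_iff]
end

def calc_universes_alt (possible : List (List Int)) : Int :=
  goB possible PySem.Dict.empty

-- ===== PRECONDITION & SPEC =====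
-- Pre_ excludes only the empty list, on which the Python A raises IndexError (possible[0]).
def Pre_calc_universes (possible : List (List Int)) : Prop := possible ≠ []
instance (possible : List (List Int)) : Decidable (Pre_calc_universes possible) := by
  unfold Pre_calc_universes; infer_instance
def pvWitness_calc_universes : List (List Int) := [[1, 2], [2, 3]]

-- On possible == [] A raises IndexError (it indexes possible[0]); B returns 1, the empty selection.
def Raises_calc_universes (possible : List (List Int)) : Prop := possible = []
instance (possible : List (List Int)) : Decidable (Raises_calc_universes possible) := by
  unfold Raises_calc_universes; infer_instance
def pvRaiseWitness_calc_universes : List (List Int) := []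
def pvRaiseWitnessOut_calc_universes : Int := 1

def Spec_calc_universes (possible : List (List Int)) (out : Int) : Prop := out = calc_universes_alt possible
instance (possible : List (List Int)) (out : Int) : Decidable (Spec_calc_universes possible out) := by unfold Spec_calc_universes; infer_instance

-- ===== CLAIM (what is proved, stated in full; the proofs are below) =====
def Claim_equal_calc_universes : Prop := ∀ (possible : List (List Int)), Dom_calc_universes possible → Pre_calc_universes possible → Spec_calc_universes possible (calc_universes possible)
def Claim_raises_calc_universes : Prop := (∀ (possible : List (List Int)), Dom_calc_universes possible → Raises_calc_universes possible → ¬ Pre_calc_universes possible) ∧ (Dom_calc_universes (pvRaiseWitness_calc_universes) ∧ Raises_calc_universes (pvRaiseWitness_calc_universes) ∧ calc_universes_alt (pvRaiseWitness_calc_universes) = pvRaiseWitnessOut_calc_universes)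

-- ===== LEMMAS AND PROOFS =====

-- drop, for each value w, the first (f w) occurrences of w from the list
def stripF (f : Int → Int) : List Int → List Int
  | [] => []
  | x :: t => if 0 < f x then stripF (Function.update f x (f x - 1)) t else x :: stripF f t

theorem mem_stripF {f : Int → Int} {xs : List Int} {x : Int} (h : x ∈ stripF f xs) : x ∈ xs := by
  induction xs generalizing f with
  | nil => simp [stripF] at h
  | cons y t ih =>
    simp only [stripF] at h
    split at h
    · exact List.mem_cons_of_mem _ (ih h)
    · rcases List.mem_cons.mp h with h | h
      · simp [h]
      · exact List.mem_cons_of_mem _ (ih h)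

theorem count_stripF (f : Int → Int) (hf : ∀ v, 0 ≤ f v) (xs : List Int) (v : Int) :
    ((stripF f xs).count v : Int) = max 0 ((xs.count v : Int) - f v) := by
  induction xs generalizing f with
  | nil => have := hf v; simp [stripF]; omega
  | cons x t ih =>
    simp only [stripF]
    by_cases hx : 0 < f x
    · rw [if_pos hx]
      have hnn : ∀ w, 0 ≤ Function.update f x (f x - 1) w := by
        intro w
        by_cases hw : w = x
        · subst hw; simp [Function.update]; omega
        · rw [Function.update_apply, if_neg hw]; exact hf w
      rw [ih _ hnn]
      by_cases hv : v = x
      · subst hv; simp [List.count_cons_self]; omega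
      · rw [List.count_cons_of_ne (by omega)]
        simp [Function.update, hv]
    · rw [if_neg hx]
      by_cases hv : v = x
      · subst hv
        have h0 : f v = 0 := le_antisymm (by omega) (hf v)
        simp [List.count_cons_self, ih _ hf, h0]
        omega
      · rw [List.count_cons_of_ne (by omega), List.count_cons_of_ne (by omega), ih _ hf]

theorem stripF_congr {f g : Int → Int} (h : ∀ v, f v = g v) (xs : List Int) :
    stripF f xs = stripF g xs := by
  have : f = g := funext h
  rw [this]

theorem erase_stripF (f : Int → Int) (hf : ∀ v, 0 ≤ f v) (xs : List Int) (v : Int) :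
    (stripF f xs).erase v = stripF (Function.update f v (f v + 1)) xs := by
  induction xs generalizing f with
  | nil => simp [stripF]
  | cons x t ih =>
    simp only [stripF]
    by_cases hx : 0 < f x
    · -- head is dropped on both sides
      have hx' : 0 < Function.update f v (f v + 1) x := by
        by_cases hxv : x = v
        · subst hxv; simp [Function.update]; omega
        · simpa [Function.update, hxv] using hx
      rw [if_pos hx, if_pos hx']
      have hnn : ∀ w, 0 ≤ Function.update f x (f x - 1) w := by
        intro w
        by_cases hw : w = x
        · subst hw; simp [Function.update]; omega
        · rw [Function.update_apply, if_neg hw]; exact hf w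
      rw [ih _ hnn]
      apply stripF_congr
      intro w
      by_cases hwv : w = v <;> by_cases hwx : w = x <;>
        simp_all [Function.update]
    · rw [if_neg hx]
      by_cases hxv : x = v
      · -- head survives on the left and is erased; right side drops it via the bump
        subst hxv
        have h0 : f x = 0 := le_antisymm (by omega) (hf x)
        have hx' : 0 < Function.update f x (f x + 1) x := by simp [Function.update]; omega
        rw [if_pos hx', List.erase_cons_head]
        apply stripF_congr
        intro w
        by_cases hwx : w = x <;> simp [Function.update, hwx, h0]
      · have hx' : ¬ 0 < Function.update f v (f v + 1) x := by
          simpa [Function.update, hxv] using hx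
        rw [if_neg hx', List.erase_cons_tail (by simp [hxv]), ih _ hf]

theorem stripF_zero (xs : List Int) : stripF (fun _ => 0) xs = xs := by
  induction xs with
  | nil => rfl
  | cons y t ih => simp [stripF, ih]

theorem pyRemoveIfPresent_eq_erase (tx : List Int) (v : Int) :
    pyRemoveIfPresent tx v = tx.erase v := by
  unfold pyRemoveIfPresent
  by_cases h : v ∈ tx
  · simp [h, PySem.List.remove?_eq_some_erase tx v h]
  · simp [h, List.erase_of_not_mem h]

theorem loopA_spec (items : List Int) (tail : List (List Int)) (totals : Int) :
    loopA items tail totals =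
      totals + (items.map (fun item => calc_universes (tail.map (fun tx => pyRemoveIfPresent tx item)))).sum := by
  induction items generalizing totals with
  | nil => simp [loopA]
  | cons item rest ih => rw [loopA, ih]; simp; ring

theorem sum_map_split (l : List Int) (F : Int → Int) (v : Int) :
    (l.map F).sum = (l.count v : Int) * F v + ((l.filter (fun x => !(x == v))).map F).sum := by
  induction l with
  | nil => simp
  | cons x t ih =>
    by_cases h : x = v
    · subst h
      simp only [List.map_cons, List.sum_cons, List.count_cons_self, List.filter_cons]
      simp [ih]; ring
    · simp only [List.map_cons, List.sum_cons, List.filter_cons]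
      rw [List.count_cons_of_ne (by simpa using h)]
      simp [h, ih]; ring

theorem loopB_spec (suffix : List Int) (pool : List Int) (rest : List (List Int))
    (used : PySem.Dict Int Int) (seen : PySem.Set Int) (total : Int) (l' : List Int)
    (ha : ∀ x ∈ l', x ∈ suffix ∧ x ∉ seen)
    (hb : ∀ v ∈ suffix, v ∉ seen →
      (l'.count v : Int) = max 0 ((pool.count v : Int) - used.getD v 0)) :
    loopB suffix pool rest used seen total =
      total + (l'.map (fun x => goB rest (used.insert x (used.getD x 0 + 1)))).sum := by
  induction suffix generalizing seen total l' with
  | nil =>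
    have hl : l' = [] := List.eq_nil_iff_forall_not_mem.mpr (fun x hx => by
      have := (ha x hx).1; simp at this)
    rw [loopB.eq_def]
    dsimp only
    simp [hl]
  | cons v more ih =>
    rw [loopB.eq_def]
    dsimp only
    by_cases hsv : v ∈ seen
    · rw [if_pos hsv]
      exact ih seen total l'
        (fun x hx => ⟨by
            rcases List.mem_cons.mp (ha x hx).1 with h | h
            · exact absurd (h ▸ hsv) (ha x hx).2
            · exact h,
          (ha x hx).2⟩)
        (fun w hw hws => hb w (List.mem_cons_of_mem _ hw) hws)
    · rw [if_neg hsv]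
      have hcv : (l'.count v : Int) = max 0 ((pool.count v : Int) - used.getD v 0) :=
        hb v (List.mem_cons_self) hsv
      by_cases hav : 0 < (pool.count v : Int) - used.getD v 0
      · rw [if_pos hav]
        have hcnt : (l'.count v : Int) = (pool.count v : Int) - used.getD v 0 := by omega
        rw [ih (PySem.Set.add seen v)
              (total + ((pool.count v : Int) - used.getD v 0) * goB rest (used.insert v (used.getD v 0 + 1)))
              (l'.filter (fun x => !(x == v)))
              (fun x hx => by
                have hmem := List.mem_filter.mp hx
                have hxv : x ≠ v := by simpa using hmem.2
                refine ⟨?_, ?_⟩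
                · rcases List.mem_cons.mp (ha x hmem.1).1 with h | h
                  · exact absurd h hxv
                  · exact h
                · intro hmemadd
                  rcases (PySem.Set.mem_add _ _ _).mp hmemadd with h | h
                  · exact (ha x hmem.1).2 h
                  · exact hxv h)
              (fun w hw hws => by
                have hwv : w ≠ v := fun h => hws ((PySem.Set.mem_add _ _ _).mpr (Or.inr h))
                have hwseen : w ∉ seen := fun h => hws ((PySem.Set.mem_add _ _ _).mpr (Or.inl h))
                have : (l'.filter (fun x => !(x == v))).count w = l'.count w := by
                  rw [List.count_filter]
                  simp [hwv]
                rw [this]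
                exact hb w (List.mem_cons_of_mem _ hw) hwseen)]
        rw [sum_map_split l' (fun x => goB rest (used.insert x (used.getD x 0 + 1))) v]
        rw [hcnt]
        ring
      · rw [if_neg hav]
        have hc0 : l'.count v = 0 := by omega
        have hvl : v ∉ l' := List.count_eq_zero.mp hc0
        exact ih (PySem.Set.add seen v) total l'
          (fun x hx => by
            have hxv : x ≠ v := fun h => hvl (h ▸ hx)
            refine ⟨?_, ?_⟩
            · rcases List.mem_cons.mp (ha x hx).1 with h | h
              · exact absurd h hxv
              · exact h
            · intro hmemadd
              rcases (PySem.Set.mem_add _ _ _).mp hmemadd with h | h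
              · exact (ha x hx).2 h
              · exact hxv h)
          (fun w hw hws => by
            have hwseen : w ∉ seen := fun h => hws ((PySem.Set.mem_add _ _ _).mpr (Or.inl h))
            exact hb w (List.mem_cons_of_mem _ hw) hwseen)

theorem goB_eq (pools : List (List Int)) (hne : pools ≠ [])
    (used : PySem.Dict Int Int) (hnn : ∀ v, 0 ≤ used.getD v 0) :
    goB pools used = calc_universes (pools.map (fun xs => stripF (fun w => used.getD w 0) xs)) := by
  induction pools generalizing used with
  | nil => exact absurd rfl hne
  | cons pool rest ih =>
    rw [goB.eq_def]
    dsimp only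
    rw [loopB_spec pool pool rest used PySem.Set.empty 0
          (stripF (fun w => used.getD w 0) pool)
          (fun x hx => ⟨mem_stripF hx, by simp [PySem.Set.empty]⟩)
          (fun v _ _ => count_stripF _ hnn pool v)]
    rw [calc_universes.eq_def]
    dsimp only [List.map_cons]
    cases rest with
    | nil =>
      rw [if_pos (by simp)]
      have h1 : ∀ x ∈ stripF (fun w => used.getD w 0) pool,
          goB [] (used.insert x (used.getD x 0 + 1)) = 1 := by
        intro x _
        rw [goB.eq_def]
      rw [List.map_congr_left h1]
      simp [List.map_const', List.sum_replicate]
    | cons r rs =>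
      rw [if_neg (by simp)]
      rw [loopA_spec]
      have h2 : ∀ x ∈ stripF (fun w => used.getD w 0) pool,
          goB (r :: rs) (used.insert x (used.getD x 0 + 1)) =
            calc_universes ((List.map (fun xs => stripF (fun w => used.getD w 0) xs) (r :: rs)).map
              (fun tx => pyRemoveIfPresent tx x)) := by
        intro x _
        have hnn2 : ∀ v, 0 ≤ (used.insert x (used.getD x 0 + 1)).getD v 0 := by
          intro v
          rw [PySem.Dict.getD_insert]
          split
          · have := hnn x; omega
          · exact hnn v
        rw [ih (by simp) (used.insert x (used.getD x 0 + 1)) hnn2]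
        congr 1
        rw [List.map_map]
        apply List.map_congr_left
        intro xs _
        simp only [Function.comp_apply]
        rw [pyRemoveIfPresent_eq_erase, erase_stripF _ hnn xs x]
        apply stripF_congr
        intro w
        rw [Function.update_apply, PySem.Dict.getD_insert]
      rw [List.map_congr_left h2]

-- ===== VERDICT (by name: the statement is the Claim_ definition above) =====
theorem calc_universes_spec : Claim_equal_calc_universes := by
  intro possible _ hpre
  unfold Spec_calc_universes calc_universes_alt
  have hz : ∀ v : Int, (PySem.Dict.empty : PySem.Dict Int Int).getD v (0 : Int) = 0 := by
    intro v; simp [PySem.Dict.getD, PySem.Dict.get?, PySem.Dict.empty]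
  have h := goB_eq possible hpre PySem.Dict.empty (fun v => le_of_eq (hz v).symm)
  rw [h]
  congr 1
  conv_lhs => rw [← List.map_id possible]
  apply List.map_congr_left
  intro xs _
  rw [stripF_congr (g := fun _ => 0) hz, stripF_zero, id]

theorem calc_universes_raises : Claim_raises_calc_universes := by
  unfold Claim_raises_calc_universes
  refine ⟨fun possible _ hr => by simp [Raises_calc_universes] at hr; simp [Pre_calc_universes, hr], by decide, by decide, ?_⟩
  simp [calc_universes_alt, pvRaiseWitness_calc_universes, pvRaiseWitnessOut_calc_universes, goB]

theorem calc_universes_raises_witness_ok :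
    calc_universes_alt pvRaiseWitness_calc_universes = pvRaiseWitnessOut_calc_universes :=
  calc_universes_raises.2.2.2
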